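-- pv_equiv track=rewrite | github.com/Galahad3x/AdventOfCode2023 | day12/day12.py | apply_possible
-- ===== SOURCE A (Python) =====
-- def apply_possible(springs, possible):
--     new_spring = ""
--     possible_c = 0
--     for c in springs:
--         if c == "?":
--             new_spring += possible[possible_c]
--             possible_c += 1
--         else:
--             new_spring += c
--     return new_spring
-- ===== SOURCE B (Python) =====
-- def apply_possible(springs, possible):
--     parts = springs.split("?")
--     res = parts[0]
--     for i in range(len(parts) - 1):
--         res += possible[i] + parts[i + 1]
--     return res
-- ===== Notes on version B (the rewrite author's own statement) =====
-- stated objective: alternative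
-- what changed: Instead of scanning character by character in Python with a running substitute counter, B splits the string at every '?' once and joins the segments back with the successive substitutes interleaved; the per-character work moves into C-level str.split/concat.
import Mathlib
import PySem

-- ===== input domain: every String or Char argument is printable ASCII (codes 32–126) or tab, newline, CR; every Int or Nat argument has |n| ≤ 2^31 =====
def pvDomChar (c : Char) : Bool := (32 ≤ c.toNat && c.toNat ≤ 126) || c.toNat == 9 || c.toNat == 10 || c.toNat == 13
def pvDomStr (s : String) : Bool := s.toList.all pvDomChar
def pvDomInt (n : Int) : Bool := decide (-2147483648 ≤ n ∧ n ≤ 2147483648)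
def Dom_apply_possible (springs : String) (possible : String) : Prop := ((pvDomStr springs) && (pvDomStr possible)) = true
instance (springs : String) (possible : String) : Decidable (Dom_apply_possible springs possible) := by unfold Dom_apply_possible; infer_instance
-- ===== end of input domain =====

-- B replaces A's character-by-character scan with a running substitute counter by one split at '?'
-- followed by joining the segments with the successive substitutes interleaved (measured faster: bulk split/concat instead of a per-character loop).

-- ===== PORT A =====
-- literal port of A: fold over the characters with state (new_spring, possible_c);
-- possible[possible_c] is in range under Pre_, so pyGetD is exact there.
def apply_possible (springs : String) (possible : String) : String :=
  String.ofList
    (springs.toList.foldl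
      (fun (acc : List Char × Int) c =>
        if c = '?' then (acc.1 ++ [PySem.List.pyGetD possible.toList acc.2 ' '], acc.2 + 1)
        else (acc.1 ++ [c], acc.2))
      ([], 0)).1

-- ===== PORT B =====
-- literal port of Source B: parts = springs.split("?"); res = parts[0];
-- for i in range(len(parts)-1): res += possible[i] + parts[i+1]
-- the loop of Source B over parts = springs.split("?")
def altJoin (possible : String) (parts : List (List Char)) : String :=
  String.ofList
    ((PySem.List.pyRange 0 ((parts.length : Int) - 1) 1).foldl
      (fun (res : List Char) i =>
        res ++ PySem.List.pyGetD possible.toList i ' ' :: PySem.List.pyGetD parts (i + 1) [])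
      (PySem.List.pyGetD parts 0 []))

def apply_possible_alt (springs : String) (possible : String) : String :=
  altJoin possible (PySem.Chars.splitOn springs.toList "?".toList)

-- ===== PRECONDITION & SPEC =====
-- Pre_ excludes exactly the inputs where Python A raises IndexError:
-- more '?' characters in springs than characters in possible.
def Pre_apply_possible (springs : String) (possible : String) : Prop :=
  springs.toList.count '?' ≤ possible.toList.length
instance (springs : String) (possible : String) : Decidable (Pre_apply_possible springs possible) := by
  unfold Pre_apply_possible; infer_instance

def pvWitness_apply_possible : String × String := ("?a.?b?", "xyz")

def Spec_apply_possible (springs : String) (possible : String) (out : String) : Prop :=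
  out = apply_possible_alt springs possible
instance (springs : String) (possible : String) (out : String) : Decidable (Spec_apply_possible springs possible out) := by
  unfold Spec_apply_possible; infer_instance

-- ===== CLAIM (what is proved, stated in full; the proofs are below) =====
def Claim_equal_apply_possible : Prop := ∀ (springs : String) (possible : String), Dom_apply_possible springs possible → Pre_apply_possible springs possible → Spec_apply_possible springs possible (apply_possible springs possible)

-- ===== LEMMAS AND PROOFS =====

-- clean recursion computing springs.split("?") (single-character separator)
def mySplit (cs : List Char) : List (List Char) :=
  match cs with
  | [] => [[]]
  | '?' :: rest => [] :: mySplit rest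
  | c :: rest =>
    match mySplit rest with
    | [] => [[c]]
    | p :: ps => (c :: p) :: ps

-- the common model: substitute front-of-Q for each '?', consuming Q
def hmodel (Q : List Char) (cs : List Char) : List Char :=
  match cs with
  | [] => []
  | c :: rest => if c = '?' then Q.headD ' ' :: hmodel Q.tail rest else c :: hmodel Q rest

-- interleave the substitutes (front of Q) between the segments
def vjoin (Q : List Char) (qs : List (List Char)) : List Char :=
  match qs with
  | [] => []
  | q :: rest => Q.headD ' ' :: q ++ vjoin Q.tail rest

theorem mySplit_ne_nil (cs : List Char) : mySplit cs ≠ [] := by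
  rw [mySplit.eq_def]; split <;> simp
  split <;> simp

theorem mySplit_cons_q (rest : List Char) : mySplit ('?' :: rest) = [] :: mySplit rest := rfl

theorem mySplit_cons_ne (c : Char) (rest : List Char) (hc : c ≠ '?') :
    mySplit (c :: rest) = match mySplit rest with
      | [] => [[c]] | p :: ps => (c :: p) :: ps := by
  rw [mySplit.eq_def]
  split
  · rename_i h; cases h
  · rename_i h; simp_all
  · rename_i heq; rw [List.cons.injEq] at heq; obtain ⟨h1, h2⟩ := heq; subst h1; subst h2; rfl

theorem go_eq (l : List Char) : ∀ (fuel : Nat) (cur : List Char) (acc : List (List Char)),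
    l.length < fuel →
    PySem.Chars.splitOn.go ['?'] fuel l cur acc =
      acc.reverse ++ (match mySplit l with
        | [] => [cur.reverse]
        | p :: ps => (cur.reverse ++ p) :: ps) := by
  induction l with
  | nil =>
    intro fuel cur acc h
    match fuel with
    | fuel + 1 => simp [PySem.Chars.splitOn.go, mySplit]
  | cons c rest ih =>
    intro fuel cur acc h
    simp only [List.length_cons] at h
    match fuel with
    | fuel + 1 =>
      rw [PySem.Chars.splitOn.go]
      by_cases hc : c = '?'
      · subst hc
        have hpre : List.isPrefixOf ['?'] ('?' :: rest) = true := by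
          simp [List.isPrefixOf]
        rw [if_pos hpre]
        show PySem.Chars.splitOn.go ['?'] fuel (List.drop ['?'].length ('?' :: rest)) [] (cur.reverse :: acc) = _
        simp only [List.length_cons, List.length_nil, List.drop_succ_cons, List.drop_zero]
        rw [ih fuel [] (cur.reverse :: acc) (by omega), mySplit_cons_q]
        cases hms : mySplit rest with
        | nil => exact absurd hms (mySplit_ne_nil rest)
        | cons p ps => simp
      · have hpre : List.isPrefixOf ['?'] (c :: rest) = false := by
          simp only [List.isPrefixOf, Bool.and_eq_false_iff, beq_eq_false_iff_ne, ne_eq]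
          left; exact fun h' => hc h'.symm
        rw [if_neg (by simp [hpre])]
        rw [ih fuel (c :: cur) acc (by omega), mySplit_cons_ne c rest hc]
        cases hms : mySplit rest with
        | nil => exact absurd hms (mySplit_ne_nil rest)
        | cons p ps => simp

theorem splitOn_eq (cs : List Char) : PySem.Chars.splitOn cs ['?'] = mySplit cs := by
  rw [PySem.Chars.splitOn, go_eq cs (cs.length + 1) [] [] (by omega)]
  cases h : mySplit cs with
  | nil => exact absurd h (mySplit_ne_nil cs)
  | cons p ps => simp

-- A's fold computes hmodel
theorem foldA (P : List Char) (cs : List Char) : ∀ (acc : List Char) (k : Nat),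
    (cs.foldl (fun (a : List Char × Int) c =>
        if c = '?' then (a.1 ++ [PySem.List.pyGetD P a.2 ' '], a.2 + 1)
        else (a.1 ++ [c], a.2)) (acc, (k : Int))).1
      = acc ++ hmodel (P.drop k) cs := by
  induction cs with
  | nil => intro acc k; simp [hmodel]
  | cons c rest ih =>
    intro acc k
    by_cases hc : c = '?'
    · subst hc
      simp only [List.foldl_cons, if_true]
      have : ((k : Int) + 1) = ((k + 1 : Nat) : Int) := by push_cast; ring
      rw [this, ih (acc ++ [PySem.List.pyGetD P (k : Int) ' ']) (k + 1)]
      simp [hmodel, List.tail_drop]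
    · simp only [List.foldl_cons, if_neg hc]
      rw [ih (acc ++ [c]) k]
      simp [hmodel, hc]

-- B's range-fold computes vjoin
theorem foldB (P : List Char) : ∀ (qs pre : List (List Char)) (res : List Char) (k : Nat),
    pre.length = k + 1 →
    (PySem.List.pyRange (k : Int) ((k + qs.length : Nat) : Int) 1).foldl
      (fun (res : List Char) i =>
        res ++ PySem.List.pyGetD P i ' ' :: PySem.List.pyGetD (pre ++ qs) (i + 1) [])
      res
      = res ++ vjoin (P.drop k) qs := by
  intro qs
  induction qs with
  | nil => intro pre res k hk; simp [vjoin]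
  | cons q rest ih =>
    intro pre res k hk
    have hlt : (k : Int) < ((k + (q :: rest).length : Nat) : Int) := by
      simp only [List.length_cons]; push_cast; omega
    rw [PySem.List.pyRange_one_cons hlt, List.foldl_cons]
    have hidx : PySem.List.pyGetD (pre ++ q :: rest) ((k : Int) + 1) [] = q := by
      have h1 : ((k : Int) + 1) = ((pre.length : Nat) : Int) := by rw [hk]; push_cast; ring
      rw [h1]
      show (PySem.List.pyGet? (pre ++ q :: rest) (pre.length : Int)).getD [] = q
      rw [PySem.List.pyGet?_append_length]
      rfl
    have hb : ((k + (q :: rest).length : Nat) : Int) = (((k + 1) + rest.length : Nat) : Int) := by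
      simp only [List.length_cons]; push_cast; ring
    have hr : ((k : Int) + 1) = ((k + 1 : Nat) : Int) := by push_cast; ring
    rw [hidx, hb, hr]
    have hpre' : (pre ++ [q]).length = (k + 1) + 1 := by simp [hk]
    have := ih (pre ++ [q]) (res ++ PySem.List.pyGetD P (k : Int) ' ' :: q) (k + 1) hpre'
    rw [List.append_assoc] at this
    simp only [List.cons_append, List.nil_append] at this ⊢
    rw [this]
    simp [vjoin, List.tail_drop]

-- the bridge: substituting char by char = splitting and re-joining with substitutes
theorem hmodel_eq_vjoin (cs : List Char) : ∀ (Q : List Char),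
    hmodel Q cs = (mySplit cs).headD [] ++ vjoin Q (mySplit cs).tail := by
  induction cs with
  | nil => intro Q; simp [hmodel, mySplit, vjoin]
  | cons c rest ih =>
    intro Q
    by_cases hc : c = '?'
    · subst hc
      rw [mySplit_cons_q]
      cases hms : mySplit rest with
      | nil => exact absurd hms (mySplit_ne_nil rest)
      | cons p ps =>
        have := ih Q.tail
        rw [hms] at this
        simp only [hmodel, vjoin, List.headD_cons, List.tail_cons, List.nil_append]
        rw [this]
        simp
    · rw [mySplit_cons_ne c rest hc]
      cases hms : mySplit rest with
      | nil => exact absurd hms (mySplit_ne_nil rest)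
      | cons p ps =>
        have := ih Q
        rw [hms] at this
        simp only [hmodel, if_neg hc, List.headD_cons, List.tail_cons]
        rw [this]
        simp

-- ===== VERDICT (by name: the statement is the Claim_ definition above) =====
theorem apply_possible_spec : Claim_equal_apply_possible := by
  intro springs possible _ _
  unfold Spec_apply_possible apply_possible apply_possible_alt altJoin
  have hA := foldA possible.toList springs.toList [] 0
  simp only [Nat.cast_zero, List.drop_zero, List.nil_append] at hA
  rw [hA]
  have hsplit : PySem.Chars.splitOn springs.toList "?".toList = mySplit springs.toList := splitOn_eq springs.toList
  rw [hsplit]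
  cases hms : mySplit springs.toList with
  | nil => exact absurd hms (mySplit_ne_nil springs.toList)
  | cons p ps =>
    have hb : (((p :: ps).length : Int) - 1) = ((0 + ps.length : Nat) : Int) := by
      simp only [List.length_cons]; push_cast; ring
    rw [hb]
    have hfold := foldB possible.toList ps [p] (PySem.List.pyGetD (p :: ps) 0 []) 0 (by simp)
    simp only [List.singleton_append, Nat.cast_zero] at hfold
    rw [hfold]
    have hget0 : PySem.List.pyGetD (p :: ps) 0 [] = p := PySem.List.pyGetD_zero_cons ..
    rw [hget0]
    have := hmodel_eq_vjoin springs.toList possible.toList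
    rw [hms] at this
    simp only [List.headD_cons, List.tail_cons, List.drop_zero] at this ⊢
    rw [this]
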